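-- pv_equiv track=rewrite | github.com/shevchukstasa/moonjar-pms | business/services/material_naming.py | strip_color_words
-- ===== SOURCE A (Python) =====
-- STRIP_COLOR_WORDS = {
--     "grey", "gray", "black", "white", "red", "green", "blue",
--     "brown", "dark", "light", "cream", "beige", "pink", "yellow",
--     "abu", "abu-abu", "hitam", "putih", "merah", "hijau", "biru",
--     "coklat", "gelap", "terang", "kuning", "krem",
--     # Origin / provenance words that aren't part of canonical name
--     "bali", "java", "lombok",
-- }
--
-- def strip_color_words(name: str) -> tuple[str | None, str]:
--     """Split off leading color words from the name.
--
--     Returns (color, rest). Color is None if no color word present.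
--     Words are matched case-insensitively, only at the start of the name.
--     """
--     words = name.split()
--     color_parts: list[str] = []
--     rest_parts: list[str] = []
--     seen_non_color = False
--     for w in words:
--         wl = w.lower()
--         if wl in STRIP_COLOR_WORDS and not seen_non_color:
--             color_parts.append(w)
--         else:
--             seen_non_color = True
--             rest_parts.append(w)
--     color = " ".join(color_parts).title() if color_parts else None
--     return color, " ".join(rest_parts)
-- ===== SOURCE B (Python) =====
-- STRIP_COLOR_WORDS = {
--     "grey", "gray", "black", "white", "red", "green", "blue",
--     "brown", "dark", "light", "cream", "beige", "pink", "yellow",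
--     "abu", "abu-abu", "hitam", "putih", "merah", "hijau", "biru",
--     "coklat", "gelap", "terang", "kuning", "krem",
--     "bali", "java", "lombok",
-- }
--
-- def strip_color_words(name: str) -> tuple:
--     """Find the boundary of the leading color-word run, then slice."""
--     words = name.split()
--     i = 0
--     while i < len(words) and words[i].lower() in STRIP_COLOR_WORDS:
--         i += 1
--     prefix, rest = words[:i], words[i:]
--     color = " ".join(prefix).title() if prefix else None
--     return color, " ".join(rest)
-- ===== Notes on version B (the rewrite author's own statement) =====
-- stated objective: alternative
-- what changed: Replaced A's single stateful pass (seen_non_color flag plus two accumulator lists) with finding the boundary index of the leading color-word run and slicing words[:i]/words[i:].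
import Mathlib
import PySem

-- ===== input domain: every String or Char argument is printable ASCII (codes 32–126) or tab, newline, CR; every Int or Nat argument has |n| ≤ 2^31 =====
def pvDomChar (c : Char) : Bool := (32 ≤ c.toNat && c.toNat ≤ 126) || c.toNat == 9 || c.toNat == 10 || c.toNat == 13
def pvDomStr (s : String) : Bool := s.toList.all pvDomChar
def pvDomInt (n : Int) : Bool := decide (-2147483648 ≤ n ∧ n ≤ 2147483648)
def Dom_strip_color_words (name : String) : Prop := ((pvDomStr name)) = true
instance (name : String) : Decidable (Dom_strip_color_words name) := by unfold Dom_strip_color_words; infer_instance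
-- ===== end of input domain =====

-- B replaces A's single stateful pass (flag + two accumulator lists) by finding the
-- boundary of the leading color run and slicing; same values, 'alternative' objective.

-- shared helpers: the module constant and str.title (not in PySem; exact on ASCII:
-- a char is uppercased iff the previous char is not alphabetic, lowercased otherwise)
def pvStripSet : List String :=
  ["grey", "gray", "black", "white", "red", "green", "blue",
   "brown", "dark", "light", "cream", "beige", "pink", "yellow",
   "abu", "abu-abu", "hitam", "putih", "merah", "hijau", "biru",
   "coklat", "gelap", "terang", "kuning", "krem",
   "bali", "java", "lombok"]

def pvTitleChars : List Char → Bool → List Char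
  | [], _ => []
  | c :: cs, prevAlpha =>
    if PySem.Chars.isalpha c then
      (if prevAlpha then PySem.Chars.lowerChar c else PySem.Chars.upperChar c)
        :: pvTitleChars cs true
    else c :: pvTitleChars cs false

def pvTitle (s : String) : String := String.mk (pvTitleChars s.toList false)

-- ===== PORT A =====
def strip_color_words (name : String) : Option String × String :=
  let words := PySem.Str.split₀ name
  let st := words.foldl
    (fun (acc : List String × List String × Bool) w =>
      let wl := PySem.Str.lower w
      if pvStripSet.contains wl && !acc.2.2 then
        (acc.1 ++ [w], acc.2.1, acc.2.2)
      else
        (acc.1, acc.2.1 ++ [w], true))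
    ([], [], false)
  let color : Option String :=
    if st.1 ≠ [] then some (pvTitle (PySem.Str.join " " st.1)) else none
  (color, PySem.Str.join " " st.2.1)

-- ===== PORT B =====
-- the while loop computing the boundary index i
def pvBoundary : List String → Nat
  | [] => 0
  | w :: ws =>
    if pvStripSet.contains (PySem.Str.lower w) then pvBoundary ws + 1 else 0

def strip_color_words_alt (name : String) : Option String × String :=
  let words := PySem.Str.split₀ name
  let i := pvBoundary words
  let pre := words.take i
  let rest := words.drop i
  let color : Option String :=
    if pre ≠ [] then some (pvTitle (PySem.Str.join " " pre)) else none
  (color, PySem.Str.join " " rest)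

-- ===== PRECONDITION & SPEC =====
def Spec_strip_color_words (name : String) (out : Option String × String) : Prop := out = strip_color_words_alt name
instance (name : String) (out : Option String × String) : Decidable (Spec_strip_color_words name out) := by unfold Spec_strip_color_words; infer_instance

-- ===== CLAIM (what is proved, stated in full; the proofs are below) =====
def Claim_equal_strip_color_words : Prop := ∀ (name : String), Dom_strip_color_words name → Spec_strip_color_words name (strip_color_words name)

-- ===== LEMMAS AND PROOFS =====

-- once the flag is set, everything is appended to rest_parts
theorem pvLoop_seen (ws : List String) (cs rs : List String) :
    ws.foldl
      (fun (acc : List String × List String × Bool) w =>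
        let wl := PySem.Str.lower w
        if pvStripSet.contains wl && !acc.2.2 then
          (acc.1 ++ [w], acc.2.1, acc.2.2)
        else
          (acc.1, acc.2.1 ++ [w], true))
      (cs, rs, true)
    = (cs, rs ++ ws, true) := by
  induction ws generalizing rs with
  | nil => simp
  | cons w ws ih =>
    simp only [List.foldl_cons, Bool.not_true, Bool.and_false, Bool.false_eq_true, if_false]
    rw [ih]
    simp

-- from the fresh state, the loop computes exactly the boundary split
theorem pvLoop_fresh (ws : List String) (cs : List String) :
    (ws.foldl
      (fun (acc : List String × List String × Bool) w =>
        let wl := PySem.Str.lower w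
        if pvStripSet.contains wl && !acc.2.2 then
          (acc.1 ++ [w], acc.2.1, acc.2.2)
        else
          (acc.1, acc.2.1 ++ [w], true))
      (cs, [], false)).1 = cs ++ ws.take (pvBoundary ws)
    ∧
    (ws.foldl
      (fun (acc : List String × List String × Bool) w =>
        let wl := PySem.Str.lower w
        if pvStripSet.contains wl && !acc.2.2 then
          (acc.1 ++ [w], acc.2.1, acc.2.2)
        else
          (acc.1, acc.2.1 ++ [w], true))
      (cs, [], false)).2.1 = ws.drop (pvBoundary ws) := by
  induction ws generalizing cs with
  | nil => simp
  | cons w ws ih =>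
    simp only [List.foldl_cons, Bool.not_false, Bool.and_true]
    by_cases h : pvStripSet.contains (PySem.Str.lower w) = true
    · rw [if_pos h]
      have h1 := ih (cs ++ [w])
      have h' : PySem.Str.lower w ∈ pvStripSet := by simpa using h
      have hb : pvBoundary (w :: ws) = pvBoundary ws + 1 := by
        simp [pvBoundary, h']
      rw [hb]
      refine ⟨?_, ?_⟩
      · rw [List.take_succ_cons, h1.1, List.append_assoc]
        rfl
      · rw [List.drop_succ_cons, h1.2]
    · rw [if_neg h]
      have h' : ¬ PySem.Str.lower w ∈ pvStripSet := by simpa using h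
      have hb : pvBoundary (w :: ws) = 0 := by
        simp [pvBoundary, h']
      rw [hb, pvLoop_seen]
      simp

-- ===== VERDICT (by name: the statement is the Claim_ definition above) =====
theorem strip_color_words_spec : Claim_equal_strip_color_words := by
  intro name _
  unfold Spec_strip_color_words strip_color_words strip_color_words_alt
  have h := pvLoop_fresh (PySem.Str.split₀ name) []
  simp only [List.nil_append] at h
  simp only []
  rw [h.1, h.2]
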